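-- pv_equiv track=rewrite | github.com/fvckinfa/adventofcode2025 | code/2025/day08.py | solve
-- ===== SOURCE A (Python) =====
-- from typing import List, Tuple
--
-- def parse_points(lines: List[str]) -> List[Tuple[int, int, int]]:
-- 	pts: List[Tuple[int, int, int]] = []
-- 	for line in lines:
-- 		if not line.strip():
-- 			continue
-- 		x_str, y_str, z_str = line.strip().split(",")
-- 		pts.append((int(x_str), int(y_str), int(z_str)))
-- 	return pts
--
-- def k_shortest_edges(points: List[Tuple[int, int, int]], k: int) -> List[Tuple[int, int, int]]:
-- 	"""Return the first k edges (dist2, i, j) sorted by increasing distance squared."""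
--
-- 	edges: List[Tuple[int, int, int]] = []
-- 	n = len(points)
-- 	for i in range(n):
-- 		xi, yi, zi = points[i]
-- 		for j in range(i + 1, n):
-- 			xj, yj, zj = points[j]
-- 			dx = xi - xj
-- 			dy = yi - yj
-- 			dz = zi - zj
-- 			dist2 = dx * dx + dy * dy + dz * dz
-- 			edges.append((dist2, i, j))
--
-- 	edges.sort(key=lambda t: t[0])
-- 	return edges[:k]
--
-- class DSU:
-- 	def __init__(self, n: int) -> None:
-- 		self.parent = list(range(n))
-- 		self.size = [1] * n
--
-- 	def find(self, x: int) -> int: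
-- 		while self.parent[x] != x:
-- 			self.parent[x] = self.parent[self.parent[x]]
-- 			x = self.parent[x]
-- 		return x
--
-- 	def union(self, a: int, b: int) -> None:
-- 		ra, rb = self.find(a), self.find(b)
-- 		if ra == rb:
-- 			return
-- 		if self.size[ra] < self.size[rb]:
-- 			ra, rb = rb, ra
-- 		self.parent[rb] = ra
-- 		self.size[ra] += self.size[rb]
--
-- def solve(lines: List[str], k: int) -> int:
-- 	points = parse_points(lines)
-- 	n = len(points)
-- 	if n == 0:
-- 		return 0
--
-- 	edges = k_shortest_edges(points, k)
--
-- 	dsu = DSU(n)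
-- 	for _, i, j in edges:
-- 		dsu.union(i, j)
--
-- 	comp_sizes = {}
-- 	for i in range(n):
-- 		root = dsu.find(i)
-- 		comp_sizes[root] = dsu.size[root]
--
-- 	top3 = sorted(comp_sizes.values(), reverse=True)[:3]
-- 	if len(top3) < 3:
-- 		return 0
-- 	return top3[0] * top3[1] * top3[2]
-- ===== SOURCE B (Python) =====
-- from typing import List, Tuple
--
--
-- def _point(s: str) -> Tuple[int, int, int]:
-- 	a, b, c = s.split(",")
-- 	return (int(a), int(b), int(c))
--
--
-- def solve(lines: List[str], k: int) -> int:
-- 	pts = [_point(line.strip()) for line in lines if line.strip()]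
-- 	n = len(pts)
-- 	edges = sorted(
-- 		[((pts[i][0] - pts[j][0]) * (pts[i][0] - pts[j][0])
-- 		  + (pts[i][1] - pts[j][1]) * (pts[i][1] - pts[j][1])
-- 		  + (pts[i][2] - pts[j][2]) * (pts[i][2] - pts[j][2]), i, j)
-- 		 for i in range(n) for j in range(i + 1, n)],
-- 		key=lambda e: e[0])[:k]
-- 	# merge components by label propagation instead of a union-find
-- 	labels = list(range(n))
-- 	for _, i, j in edges:
-- 		li, lj = labels[i], labels[j]
-- 		if li != lj:
-- 			labels = [li if l == lj else l for l in labels]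
-- 	counts = {}
-- 	for l in labels:
-- 		counts[l] = counts.get(l, 0) + 1
-- 	top = sorted(counts.values(), reverse=True)[:3]
-- 	if len(top) < 3:
-- 		return 0
-- 	return top[0] * top[1] * top[2]
-- ===== Notes on version B (the rewrite author's own statement) =====
-- stated objective: alternative
-- what changed: Replaces A's union-find (path-halving DSU with size array and a root->size dict) by label propagation: a labels list where each merging edge relabels the smaller-structure-free way (all nodes carrying j's label get i's label), and component sizes are read off by counting labels; parsing and edge generation are restructured as comprehensions (filter/map, flatMap) instead of accumulator loops.
import Mathlib
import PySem

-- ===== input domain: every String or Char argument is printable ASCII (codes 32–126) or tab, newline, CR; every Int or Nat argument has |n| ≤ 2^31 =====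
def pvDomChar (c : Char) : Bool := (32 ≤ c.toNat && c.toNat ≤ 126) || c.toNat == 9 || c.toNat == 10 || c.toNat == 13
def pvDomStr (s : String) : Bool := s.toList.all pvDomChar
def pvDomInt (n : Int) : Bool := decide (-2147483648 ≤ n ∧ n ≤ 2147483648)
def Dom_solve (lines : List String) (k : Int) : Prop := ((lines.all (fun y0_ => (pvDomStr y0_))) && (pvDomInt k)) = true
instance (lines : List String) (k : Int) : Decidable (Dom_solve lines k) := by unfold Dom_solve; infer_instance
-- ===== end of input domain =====

-- B replaces A's union-find (path-halving DSU, size array, root dict) by label propagation over a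
-- labels list, counting labels for the component sizes; same cost class, simpler machinery ("alternative").

-- helper shared by both ports: the per-line 'a, b, c = s.split(","); (int(a), int(b), int(c))'
-- that A has inline in its parse loop and B has as its _point helper.  split? is some ("," ≠ "");
-- the getD defaults are unreachable under Pre_solve, which excludes inputs on which int()/the unpack raises.
def pvParseTriple (s : String) : Int × Int × Int :=
  let parts := (PySem.Str.split? s ",").getD []
  ((PySem.Int.ofStr? (PySem.List.pyGetD parts 0 "")).getD 0,
   (PySem.Int.ofStr? (PySem.List.pyGetD parts 1 "")).getD 0,
   (PySem.Int.ofStr? (PySem.List.pyGetD parts 2 "")).getD 0)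

-- ===== PORT A =====
def parsePoints (lines : List String) : List (Int × Int × Int) :=
  lines.foldl (fun pts line =>
    if PySem.Str.strip line = "" then pts
    else pts ++ [pvParseTriple (PySem.Str.strip line)]) []

-- DSU.find: 'while parent[x] != x: parent[x] = parent[parent[x]]; x = parent[x]' with fuel
-- len(parent); the lemmas below prove this fuel always suffices (the parent forest is rooted),
-- so the fuel-exhausted branch is never taken on the states solve builds.
def dsuFindF : Nat → List Int → Int → List Int × Int
  | 0, parent, x => (parent, x)
  | fuel+1, parent, x =>
    if PySem.List.pyGetD parent x 0 ≠ x then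
      let gp := PySem.List.pyGetD parent (PySem.List.pyGetD parent x 0) 0
      dsuFindF fuel (PySem.List.pySetD parent x gp) gp
    else (parent, x)

def dsuFind (parent : List Int) (x : Int) : List Int × Int := dsuFindF parent.length parent x

def dsuUnion (parent size : List Int) (a b : Int) : List Int × List Int :=
  let fa := dsuFind parent a
  let fb := dsuFind fa.1 b
  if fa.2 = fb.2 then (fb.1, size)
  else
    let rr := if PySem.List.pyGetD size fa.2 0 < PySem.List.pyGetD size fb.2 0 then (fb.2, fa.2) else (fa.2, fb.2)
    (PySem.List.pySetD fb.1 rr.2 rr.1,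
     PySem.List.pySetD size rr.1 (PySem.List.pyGetD size rr.1 0 + PySem.List.pyGetD size rr.2 0))

def kShortestEdges (points : List (Int × Int × Int)) (k : Int) : List (Int × Int × Int) :=
  let n := (points.length : Int)
  let edges := (PySem.List.pyRange 0 n 1).foldl (fun edges i =>
    let pi := PySem.List.pyGetD points i (0, 0, 0)
    (PySem.List.pyRange (i+1) n 1).foldl (fun edges j =>
      let pj := PySem.List.pyGetD points j (0, 0, 0)
      let dx := pi.1 - pj.1
      let dy := pi.2.1 - pj.2.1
      let dz := pi.2.2 - pj.2.2
      edges ++ [(dx*dx + dy*dy + dz*dz, i, j)]) edges) []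
  PySem.List.slice (PySem.List.sorted edges (fun t => t.1) false) none (some k)

def solve (lines : List String) (k : Int) : Int :=
  let points := parsePoints lines
  let n := points.length
  if n = 0 then 0
  else
    let edges := kShortestEdges points k
    let st := edges.foldl (fun (st : List Int × List Int) e => dsuUnion st.1 st.2 e.2.1 e.2.2)
      (PySem.List.pyRange 0 (n : Int) 1, List.replicate n (1 : Int))
    let comp := (PySem.List.pyRange 0 (n : Int) 1).foldl
      (fun (pc : List Int × PySem.Dict Int Int) i =>
        let fr := dsuFind pc.1 i
        (fr.1, pc.2.insert fr.2 (PySem.List.pyGetD st.2 fr.2 0))) (st.1, PySem.Dict.empty)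
    let top3 := PySem.List.slice (PySem.List.sorted comp.2.values (fun v => v) true) none (some 3)
    if top3.length < 3 then 0
    else PySem.List.pyGetD top3 0 0 * PySem.List.pyGetD top3 1 0 * PySem.List.pyGetD top3 2 0

-- ===== PORT B =====
def solve_alt (lines : List String) (k : Int) : Int :=
  let pts := (lines.filter (fun line => !(PySem.Str.strip line == ""))).map
      (fun line => pvParseTriple (PySem.Str.strip line))
  let n := pts.length
  let edges0 := (PySem.List.pyRange 0 (n : Int) 1).flatMap (fun i =>
      (PySem.List.pyRange (i+1) (n : Int) 1).map (fun j =>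
        let pi := PySem.List.pyGetD pts i (0, 0, 0)
        let pj := PySem.List.pyGetD pts j (0, 0, 0)
        ((pi.1 - pj.1) * (pi.1 - pj.1) + (pi.2.1 - pj.2.1) * (pi.2.1 - pj.2.1)
          + (pi.2.2 - pj.2.2) * (pi.2.2 - pj.2.2), i, j)))
  let edges := PySem.List.slice (PySem.List.sorted edges0 (fun e => e.1) false) none (some k)
  let labels := edges.foldl (fun lab (e : Int × Int × Int) =>
      let li := PySem.List.pyGetD lab e.2.1 0
      let lj := PySem.List.pyGetD lab e.2.2 0
      if li ≠ lj then lab.map (fun l => if l = lj then li else l) else lab)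
    (PySem.List.pyRange 0 (n : Int) 1)
  let counts := labels.foldl (fun (d : PySem.Dict Int Int) l => d.insert l (d.getD l 0 + 1)) PySem.Dict.empty
  let top := PySem.List.slice (PySem.List.sorted counts.values (fun v => v) true) none (some 3)
  if top.length < 3 then 0
  else PySem.List.pyGetD top 0 0 * PySem.List.pyGetD top 1 0 * PySem.List.pyGetD top 2 0

-- ===== PRECONDITION & SPEC =====
-- Pre_solve: every non-blank line strips to exactly three comma-separated int()-parsable fields —
-- exactly the inputs on which Python's solve returns (otherwise int()/tuple unpacking raises ValueError).
def Pre_solve (lines : List String) (k : Int) : Prop :=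
  ∀ line ∈ lines, PySem.Str.strip line ≠ "" →
    ((PySem.Str.split? (PySem.Str.strip line) ",").getD []).length = 3 ∧
    ∀ part ∈ (PySem.Str.split? (PySem.Str.strip line) ",").getD [], (PySem.Int.ofStr? part).isSome
instance (lines : List String) (k : Int) : Decidable (Pre_solve lines k) := by unfold Pre_solve; infer_instance

def pvWitness_solve : List String × Int := (["0,0,0", " 1 ,1,1", "5,5,5", ""], 2)

def Spec_solve (lines : List String) (k : Int) (out : Int) : Prop := out = solve_alt lines k
instance (lines : List String) (k : Int) (out : Int) : Decidable (Spec_solve lines k out) := by unfold Spec_solve; infer_instance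

-- ===== CLAIM (what is proved, stated in full; the proofs are below) =====
def Claim_equal_solve : Prop := ∀ (lines : List String) (k : Int), Dom_solve lines k → Pre_solve lines k → Spec_solve lines k (solve lines k)

-- ===== LEMMAS AND PROOFS =====

def pvG (p : List Int) (x : Nat) : Nat := (p.getD x 0).toNat

def pvRt (p : List Int) (x : Nat) : Prop := pvG p x = x

theorem pvRt_iterate {p : List Int} {x : Nat} (h : pvRt p x) (k : Nat) :
    (pvG p)^[k] x = x := Function.iterate_fixed h k

theorem pvIter_stab {p : List Int} {x : Nat} {k m : Nat}
    (h : pvRt p ((pvG p)^[k] x)) (hkm : k ≤ m) : (pvG p)^[m] x = (pvG p)^[k] x := by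
  have hm : m = (m - k) + k := by omega
  rw [hm, Function.iterate_add_apply]
  exact pvRt_iterate h (m - k)

theorem pvIter_lt {p : List Int} {n : Nat} (hr : ∀ x, x < n → pvG p x < n)
    {x : Nat} (hx : x < n) (k : Nat) : (pvG p)^[k] x < n := by
  induction k generalizing x with
  | zero => simpa using hx
  | succ k ih => rw [Function.iterate_succ_apply]; exact ih (hr x hx)

theorem pvReach_reduce {p : List Int} {x a b : Nat} (hab : a < b)
    (heq : (pvG p)^[a] x = (pvG p)^[b] x) :
    ∀ m, pvRt p ((pvG p)^[m] x) → ∃ e, e < b ∧ pvRt p ((pvG p)^[e] x) := by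
  intro m
  induction m using Nat.strong_induction_on with
  | _ m ih =>
    intro hm
    by_cases hmb : m < b
    · exact ⟨m, hmb, hm⟩
    · have hd : (pvG p)^[m - (b - a)] x = (pvG p)^[m] x := by
        obtain ⟨c, h1, h2⟩ : ∃ c, m = c + b ∧ m - (b - a) = c + a := ⟨m - b, by omega, by omega⟩
        rw [h2, h1, Function.iterate_add_apply, Function.iterate_add_apply, heq]
      exact ih (m - (b - a)) (by omega) (by rw [hd]; exact hm)

theorem pvReach_bound {p : List Int} {n : Nat} (hr : ∀ x, x < n → pvG p x < n)
    {x : Nat} (hx : x < n) (hroot : ∃ k, pvRt p ((pvG p)^[k] x)) :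
    pvRt p ((pvG p)^[n-1] x) := by
  obtain ⟨k, hk⟩ := hroot
  by_cases hkn : k ≤ n - 1
  · rw [pvIter_stab hk hkn]; exact hk
  · have hmaps : ∀ a ∈ Finset.range (n+1), (pvG p)^[a] x ∈ Finset.range n := by
      intro a _; exact Finset.mem_range.mpr (pvIter_lt hr hx a)
    obtain ⟨a, ha, b, hb, hab, heq⟩ :=
      Finset.exists_ne_map_eq_of_card_lt_of_maps_to (by simp) hmaps
    have hres : ∃ e, e < max a b ∧ pvRt p ((pvG p)^[e] x) := by
      rcases Nat.lt_or_ge a b with h | h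
      · have := pvReach_reduce h heq k hk
        obtain ⟨e, he, hre⟩ := this
        exact ⟨e, by omega, hre⟩
      · have h' : b < a := by omega
        obtain ⟨e, he, hre⟩ := pvReach_reduce h' heq.symm k hk
        exact ⟨e, by omega, hre⟩
    obtain ⟨e, he, hre⟩ := hres
    have hen : e ≤ n - 1 := by
      have := Finset.mem_range.mp ha
      have := Finset.mem_range.mp hb
      have hk' : ¬ k ≤ n - 1 := hkn
      -- e < max a b ≤ n; if e = n then... need e ≤ n-1 i.e. e < n
      have hmax : max a b ≤ n := by omega
      have hen' : e < n := by omega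
      omega
    rw [pvIter_stab hre hen]; exact hre

structure DSUInv (n : Nat) (p sz lab : List Int) : Prop where
  hp : p.length = n
  hs : sz.length = n
  hl : lab.length = n
  hnn : ∀ x, x < n → 0 ≤ p.getD x 0
  hrange : ∀ x, x < n → pvG p x < n
  hrooted : ∀ x, x < n → ∃ k, pvRt p ((pvG p)^[k] x)
  hlab : ∀ x, x < n → lab.getD (pvG p x) 0 = lab.getD x 0
  hinj : ∀ x, x < n → ∀ y, y < n → lab.getD x 0 = lab.getD y 0 → (pvG p)^[n] x = (pvG p)^[n] y
  hsize : ∀ r, r < n → pvRt p r → sz.getD r 0 = (lab.count (lab.getD r 0) : Int)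

theorem pvGetD_set_ne {l : List Int} {i w : Nat} {v d : Int} (hne : w ≠ i) :
    (l.set i v).getD w d = l.getD w d := by
  simp [List.getD, List.getElem?_set, Ne.symm hne]

theorem pvGetD_set_self {l : List Int} {i : Nat} {v d : Int} (h : i < l.length) :
    (l.set i v).getD i d = v := by
  simp [List.getD, h]

theorem pvGetD_natCast_int {p : List Int} {z : Nat} {n : Nat} (hz : z < n)
    (hnn : ∀ x, x < n → 0 ≤ p.getD x 0) : p.getD z 0 = ((pvG p z : Nat) : Int) :=
  (Int.toNat_of_nonneg (hnn z hz)).symm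

theorem pvHalve_step {n : Nat} {p sz lab : List Int} (hI : DSUInv n p sz lab)
    {z : Nat} (hz : z < n) (hnr : ¬ pvRt p z) :
    DSUInv n (p.set z ((pvG p (pvG p z) : Nat) : Int)) sz lab ∧
    (∀ w, w < n → (pvG (p.set z ((pvG p (pvG p z) : Nat) : Int)))^[n] w = (pvG p)^[n] w) ∧
    (∀ r, (pvRt (p.set z ((pvG p (pvG p z) : Nat) : Int)) r ↔ pvRt p r)) ∧
    (∀ k w, ∃ m, k ≤ m ∧ (pvG (p.set z ((pvG p (pvG p z) : Nat) : Int)))^[k] w = (pvG p)^[m] w) := by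
  set p' := p.set z ((pvG p (pvG p z) : Nat) : Int) with hp'
  have hzl : z < p.length := hI.hp ▸ hz
  have hg' : ∀ w, pvG p' w = if w = z then pvG p (pvG p z) else pvG p w := by
    intro w
    by_cases hw : w = z
    · subst hw
      rw [if_pos rfl]
      show ((p.set w ((pvG p (pvG p w) : Nat) : Int)).getD w 0).toNat = pvG p (pvG p w)
      rw [pvGetD_set_self hzl, Int.toNat_natCast]
    · rw [if_neg hw]
      show ((p.set z ((pvG p (pvG p z) : Nat) : Int)).getD w 0).toNat = pvG p w
      rw [pvGetD_set_ne hw]; rfl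
  have hnc : pvG p (pvG p z) ≠ z := by
    intro hcyc
    have hzy : pvG p z ≠ z := hnr
    have hcl : ∀ k, (pvG p)^[k] z = z ∨ (pvG p)^[k] z = pvG p z := by
      intro k
      induction k with
      | zero => exact Or.inl rfl
      | succ k ih =>
        rw [Function.iterate_succ_apply']
        rcases ih with h | h
        · rw [h]; exact Or.inr rfl
        · rw [h, hcyc]; exact Or.inl rfl
    obtain ⟨k, hk⟩ := hI.hrooted z hz
    rcases hcl k with h | h
    · rw [h] at hk; exact hnr hk
    · rw [h] at hk
      exact hzy ((show pvG p (pvG p z) = pvG p z from hk).symm.trans hcyc)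
  have hroots : ∀ r, pvRt p' r ↔ pvRt p r := by
    intro r
    show (pvG p' r = r) ↔ (pvG p r = r)
    rw [hg' r]
    by_cases hr : r = z
    · subst hr
      rw [if_pos rfl]
      exact ⟨fun h => absurd h hnc, fun h => absurd h hnr⟩
    · rw [if_neg hr]
  have hchain : ∀ k w, ∃ m, k ≤ m ∧ (pvG p')^[k] w = (pvG p)^[m] w := by
    intro k w
    induction k with
    | zero => exact ⟨0, le_refl _, rfl⟩
    | succ k ih =>
      obtain ⟨m, hkm, hmw⟩ := ih
      rw [Function.iterate_succ_apply', hmw, hg']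
      by_cases hc : (pvG p)^[m] w = z
      · refine ⟨m + 2, by omega, ?_⟩
        rw [if_pos hc]
        have h2 : (pvG p)^[m+2] w = (pvG p) ((pvG p) ((pvG p)^[m] w)) := by
          rw [Function.iterate_succ_apply', Function.iterate_succ_apply']
        rw [h2, hc]
      · exact ⟨m + 1, by omega, by rw [if_neg hc, Function.iterate_succ_apply']⟩
  have hrteq : ∀ w, w < n → (pvG p')^[n] w = (pvG p)^[n] w := by
    intro w hw
    obtain ⟨m, hnm, hmw⟩ := hchain n w
    rw [hmw]
    have hb := pvReach_bound hI.hrange hw (hI.hrooted w hw)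
    rw [pvIter_stab (m := m) hb (by omega), pvIter_stab (m := n) hb (by omega)]
  have hInv' : DSUInv n p' sz lab := by
    refine ⟨by simp [hp', hI.hp], hI.hs, hI.hl, ?_, ?_, ?_, ?_, ?_, ?_⟩
    · intro x hx
      by_cases hxz : x = z
      · subst hxz; rw [hp', pvGetD_set_self hzl]; exact Int.natCast_nonneg _
      · rw [hp', pvGetD_set_ne hxz]; exact hI.hnn x hx
    · intro x hx
      rw [hg']
      by_cases hxz : x = z
      · rw [if_pos hxz]; exact hI.hrange _ (hI.hrange z hz)
      · rw [if_neg hxz]; exact hI.hrange x hx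
    · intro x hx
      refine ⟨n, ?_⟩
      rw [hrteq x hx, hroots]
      have hb := pvReach_bound hI.hrange hx (hI.hrooted x hx)
      rw [pvIter_stab hb (by omega)]
      exact hb
    · intro x hx
      rw [hg']
      by_cases hxz : x = z
      · subst hxz
        rw [if_pos rfl, hI.hlab _ (hI.hrange x hx), hI.hlab x hx]
      · rw [if_neg hxz]; exact hI.hlab x hx
    · intro x hx y hy hxy
      rw [hrteq x hx, hrteq y hy]
      exact hI.hinj x hx y hy hxy
    · intro r hr hrt
      exact hI.hsize r hr ((hroots r).mp hrt)
  exact ⟨hInv', hrteq, hroots, hchain⟩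

theorem pvFindF_run {n : Nat} {sz lab : List Int} :
    ∀ (fuel : Nat) (p : List Int) (z : Nat), DSUInv n p sz lab → z < n →
    pvRt p ((pvG p)^[fuel] z) →
    DSUInv n (dsuFindF fuel p (z : Int)).1 sz lab ∧
    (∀ w, w < n → (pvG (dsuFindF fuel p (z : Int)).1)^[n] w = (pvG p)^[n] w) ∧
    (∀ r, (pvRt (dsuFindF fuel p (z : Int)).1 r ↔ pvRt p r)) ∧
    (dsuFindF fuel p (z : Int)).2 = (((pvG p)^[n] z : Nat) : Int) := by
  intro fuel
  induction fuel with
  | zero =>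
    intro p z hI hz hroot
    refine ⟨hI, fun w _ => rfl, fun r => Iff.rfl, ?_⟩
    show (z : Int) = _
    rw [pvRt_iterate (by simpa using hroot) n]
  | succ fuel ih =>
    intro p z hI hz hroot
    have hgd : PySem.List.pyGetD p (z : Int) 0 = ((pvG p z : Nat) : Int) := by
      rw [PySem.List.pyGetD_natCast]
      exact pvGetD_natCast_int hz hI.hnn
    by_cases hrt : pvRt p z
    · have hcond : ¬ (PySem.List.pyGetD p (z : Int) 0 ≠ (z : Int)) := by
        rw [hgd, hrt]; simp
      rw [show dsuFindF (fuel+1) p (z:Int) = (p, (z:Int)) from by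
        simp only [dsuFindF, if_neg hcond]]
      refine ⟨hI, fun w _ => rfl, fun r => Iff.rfl, ?_⟩
      show (z : Int) = _
      rw [pvRt_iterate hrt n]
    · have hcond : PySem.List.pyGetD p (z : Int) 0 ≠ (z : Int) := by
        rw [hgd]
        intro h
        exact hrt (by exact_mod_cast h)
      have hg2 : PySem.List.pyGetD p (PySem.List.pyGetD p (z : Int) 0) 0
          = ((pvG p (pvG p z) : Nat) : Int) := by
        rw [hgd, PySem.List.pyGetD_natCast]
        exact pvGetD_natCast_int (hI.hrange z hz) hI.hnn
      have hstep : dsuFindF (fuel+1) p (z:Int)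
          = dsuFindF fuel (p.set z ((pvG p (pvG p z) : Nat) : Int)) ((pvG p (pvG p z) : Nat) : Int) := by
        simp only [dsuFindF, if_pos hcond, hg2, PySem.List.pySetD_natCast]
      obtain ⟨hI', hrteq, hroots, hchain⟩ := pvHalve_step hI hz hrt
      set p' := p.set z ((pvG p (pvG p z) : Nat) : Int) with hp'
      set z' := pvG p (pvG p z) with hz'
      have hz'n : z' < n := hI.hrange _ (hI.hrange z hz)
      have hz'it : ∀ m : Nat, (pvG p)^[m] z' = (pvG p)^[m+2] z := by
        intro m
        rw [hz']
        rw [show m + 2 = m + 1 + 1 from rfl, Function.iterate_succ_apply, Function.iterate_succ_apply]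
      have hroot' : pvRt p' ((pvG p')^[fuel] z') := by
        obtain ⟨m, hm, hmv⟩ := hchain fuel z'
        rw [hmv, hz'it m]
        have hlt : (pvG p)^[m+2] z < n := pvIter_lt hI.hrange hz (m+2)
        rw [pvIter_stab (m := m+2) hroot (by omega)]
        rw [hroots]
        exact hroot
      obtain ⟨hI2, hrteq2, hroots2, hval2⟩ := ih p' z' hI' hz'n hroot'
      rw [hstep]
      refine ⟨hI2, ?_, ?_, ?_⟩
      · intro w hw
        rw [hrteq2 w hw, hrteq w hw]
      · intro r
        rw [hroots2 r, hroots r]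
      · rw [hval2]
        congr 1
        rw [hrteq z' hz'n, hz'it n]
        have hb := pvReach_bound hI.hrange hz (hI.hrooted z hz)
        rw [pvIter_stab (m := n+2) hb (by omega), pvIter_stab (m := n) hb (by omega)]

theorem pvFind_spec {n : Nat} {p sz lab : List Int} (hI : DSUInv n p sz lab)
    {z : Nat} (hz : z < n) :
    DSUInv n (dsuFind p (z : Int)).1 sz lab ∧
    (∀ w, w < n → (pvG (dsuFind p (z : Int)).1)^[n] w = (pvG p)^[n] w) ∧
    (∀ r, (pvRt (dsuFind p (z : Int)).1 r ↔ pvRt p r)) ∧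
    (dsuFind p (z : Int)).2 = (((pvG p)^[n] z : Nat) : Int) := by
  have hroot : pvRt p ((pvG p)^[n] z) := by
    have hb := pvReach_bound hI.hrange hz (hI.hrooted z hz)
    rw [pvIter_stab (m := n) hb (by omega)]
    exact hb
  simp only [dsuFind, hI.hp]
  exact pvFindF_run n p z hI hz (by rw [pvIter_stab (m := n) hroot (by omega)]; exact hroot)

theorem pvRt_rt {n : Nat} {p sz lab : List Int} (hI : DSUInv n p sz lab)
    {x : Nat} (hx : x < n) : pvRt p ((pvG p)^[n] x) := by
  have hb := pvReach_bound hI.hrange hx (hI.hrooted x hx)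
  rw [pvIter_stab (m := n) hb (by omega)]
  exact hb

theorem pvLab_iter {n : Nat} {p sz lab : List Int} (hI : DSUInv n p sz lab)
    {x : Nat} (hx : x < n) (k : Nat) : lab.getD ((pvG p)^[k] x) 0 = lab.getD x 0 := by
  induction k with
  | zero => rfl
  | succ k ih =>
    rw [Function.iterate_succ_apply', hI.hlab _ (pvIter_lt hI.hrange hx k), ih]

theorem pvGetD_map {l : List Int} {φ : Int → Int} {w : Nat} (h : w < l.length) :
    (l.map φ).getD w 0 = φ (l.getD w 0) := by
  simp [List.getD, List.getElem?_map, List.getElem?_eq_getElem h]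

theorem pvCount_map {l : List Int} {φ : Int → Int} {c : Int} :
    (l.map φ).count c = l.countP (fun x => φ x == c) := by
  simp [List.count, List.countP_map]; rfl

theorem pvCountP_or_disjoint {l : List Int} {a b : Int → Bool}
    (h : ∀ x ∈ l, ¬(a x = true ∧ b x = true)) :
    l.countP (fun x => a x || b x) = l.countP a + l.countP b := by
  induction l with
  | nil => rfl
  | cons y ys ih =>
    have hy := h y (by simp)
    have ih' := ih (fun x hx => h x (by simp [hx]))
    by_cases ha : a y = true
    · have hb : ¬ b y = true := fun hb => hy ⟨ha, hb⟩
      simp [List.countP_cons, ha, hb, ih']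
      omega
    · by_cases hb : b y = true
      · simp [List.countP_cons, ha, hb, ih']
        omega
      · simp [List.countP_cons, ha, hb, ih']

theorem pvMerge_inv {n : Nat} {p sz lab : List Int} (hI : DSUInv n p sz lab)
    {i j u v : Nat} (hi : i < n) (hj : j < n)
    (hne : (pvG p)^[n] i ≠ (pvG p)^[n] j)
    (huv : (u = (pvG p)^[n] i ∧ v = (pvG p)^[n] j) ∨ (u = (pvG p)^[n] j ∧ v = (pvG p)^[n] i)) :
    DSUInv n (p.set v (u : Int)) (sz.set u (sz.getD u 0 + sz.getD v 0))
      (lab.map (fun l => if l = lab.getD j 0 then lab.getD i 0 else l)) := by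
  have hn1 : 1 ≤ n := by omega
  set li := lab.getD i 0 with hli
  set lj := lab.getD j 0 with hlj
  set φ : Int → Int := fun l => if l = lj then li else l with hφ
  set rti := (pvG p)^[n] i with hrti
  set rtj := (pvG p)^[n] j with hrtj
  have hun : u < n := by
    rcases huv with ⟨h1, _⟩ | ⟨h1, _⟩ <;> rw [h1] <;> exact pvIter_lt hI.hrange (by assumption) n
  have hvn : v < n := by
    rcases huv with ⟨_, h2⟩ | ⟨_, h2⟩ <;> rw [h2] <;> exact pvIter_lt hI.hrange (by assumption) n
  have hru : pvRt p u := by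
    rcases huv with ⟨h1, _⟩ | ⟨h1, _⟩ <;> rw [h1] <;> exact pvRt_rt hI (by assumption)
  have hrv : pvRt p v := by
    rcases huv with ⟨_, h2⟩ | ⟨_, h2⟩ <;> rw [h2] <;> exact pvRt_rt hI (by assumption)
  have huvne : u ≠ v := by
    rcases huv with ⟨h1, h2⟩ | ⟨h1, h2⟩ <;> rw [h1, h2] <;> [exact hne; exact hne.symm]
  have hLrti : lab.getD rti 0 = li := pvLab_iter hI hi n
  have hLrtj : lab.getD rtj 0 = lj := pvLab_iter hI hj n
  have hlij : li ≠ lj := by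
    intro h
    exact hne (hI.hinj i hi j hj h)
  have hLuv : (lab.getD u 0 = li ∧ lab.getD v 0 = lj) ∨ (lab.getD u 0 = lj ∧ lab.getD v 0 = li) := by
    rcases huv with ⟨h1, h2⟩ | ⟨h1, h2⟩
    · exact Or.inl ⟨by rw [h1, hLrti], by rw [h2, hLrtj]⟩
    · exact Or.inr ⟨by rw [h1, hLrtj], by rw [h2, hLrti]⟩
  have hφli : φ li = li := if_neg hlij
  have hφlj : φ lj = li := if_pos rfl
  have hφu : φ (lab.getD u 0) = li := by rcases hLuv with ⟨h1, _⟩ | ⟨h1, _⟩ <;> rw [h1] <;> [exact hφli; exact hφlj]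
  have hφv : φ (lab.getD v 0) = li := by rcases hLuv with ⟨_, h2⟩ | ⟨_, h2⟩ <;> rw [h2] <;> [exact hφlj; exact hφli]
  set p3 := p.set v (u : Int) with hp3
  set lab' := lab.map φ with hlab'
  have hvl : v < p.length := hI.hp ▸ hvn
  have hg3 : ∀ w, pvG p3 w = if w = v then u else pvG p w := by
    intro w
    by_cases hw : w = v
    · subst hw
      rw [if_pos rfl]
      show ((p.set w (u : Int)).getD w 0).toNat = u
      rw [pvGetD_set_self hvl, Int.toNat_natCast]
    · rw [if_neg hw]
      show ((p.set v (u : Int)).getD w 0).toNat = pvG p w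
      rw [pvGetD_set_ne hw]; rfl
  have hchain3 : ∀ k z, (pvG p3)^[k] z = (pvG p)^[k] z ∨
      ((pvG p3)^[k] z = u ∧ (pvG p)^[k] z = v) := by
    intro k z
    induction k with
    | zero => exact Or.inl rfl
    | succ k ih =>
      rw [Function.iterate_succ_apply', Function.iterate_succ_apply']
      rcases ih with h | ⟨h3, h2⟩
      · rw [h, hg3]
        by_cases hc : (pvG p)^[k] z = v
        · rw [if_pos hc, hc]
          exact Or.inr ⟨rfl, hrv⟩
        · rw [if_neg hc]
          exact Or.inl rfl
      · rw [h3, h2, hg3, if_neg huvne, hru, hrv]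
        exact Or.inr ⟨rfl, rfl⟩
  have hrt3 : ∀ z, z < n → (pvG p3)^[n] z = if (pvG p)^[n] z = v then u else (pvG p)^[n] z := by
    intro z hz
    have hb := pvReach_bound hI.hrange hz (hI.hrooted z hz)
    have hsn : (pvG p)^[n] z = (pvG p)^[n-1] z := pvIter_stab (m := n) hb (by omega)
    have hiter : (pvG p3)^[n] z = pvG p3 ((pvG p3)^[n-1] z) := by
      conv_lhs => rw [show n = (n-1) + 1 by omega, Function.iterate_succ_apply']
    rcases hchain3 (n-1) z with h | ⟨h3, h2⟩
    · by_cases hc : (pvG p)^[n-1] z = v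
      · rw [hiter, h, hc, hg3, if_pos rfl, if_pos (by rw [hsn, hc])]
      · rw [hiter, h, hg3, if_neg hc, if_neg (by rw [hsn]; exact hc)]
        rw [show pvG p ((pvG p)^[n-1] z) = (pvG p)^[n] z from by
          conv_rhs => rw [show n = (n-1) + 1 by omega, Function.iterate_succ_apply']]
    · rw [hiter, h3, hg3, if_neg huvne, hru, if_pos (by rw [hsn]; exact h2)]
  refine ⟨?_, ?_, ?_, ?_, ?_, ?_, ?_, ?_, ?_⟩
  · simp [hp3, hI.hp]
  · simp [hI.hs]
  · simp [hlab', hI.hl]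
  · intro x hx
    by_cases hxv : x = v
    · subst hxv; rw [hp3, pvGetD_set_self hvl]; exact Int.natCast_nonneg _
    · rw [hp3, pvGetD_set_ne hxv]; exact hI.hnn x hx
  · intro x hx
    rw [hg3]
    by_cases hxv : x = v
    · rw [if_pos hxv]; exact hun
    · rw [if_neg hxv]; exact hI.hrange x hx
  · intro x hx
    refine ⟨n, ?_⟩
    rw [hrt3 x hx]
    by_cases hc : (pvG p)^[n] x = v
    · rw [if_pos hc]
      show pvG p3 u = u
      rw [hg3, if_neg huvne]; exact hru
    · rw [if_neg hc]
      show pvG p3 ((pvG p)^[n] x) = (pvG p)^[n] x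
      rw [hg3, if_neg hc]
      exact pvRt_rt hI hx
  · intro x hx
    have hgx : pvG p3 x < n := by
      rw [hg3]; by_cases hxv : x = v
      · rw [if_pos hxv]; exact hun
      · rw [if_neg hxv]; exact hI.hrange x hx
    rw [hlab', pvGetD_map (hI.hl ▸ hgx), pvGetD_map (hI.hl ▸ hx), hg3]
    by_cases hxv : x = v
    · rw [if_pos hxv, hφu, hxv, hφv]
    · rw [if_neg hxv]
      rw [hI.hlab x hx]
  · intro x hx y hy hxy
    rw [hlab', pvGetD_map (hI.hl ▸ hx), pvGetD_map (hI.hl ▸ hy)] at hxy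
    rw [hrt3 x hx, hrt3 y hy]
    have hphi : ∀ a b : Int, φ a = φ b → a = b ∨ ((a = li ∨ a = lj) ∧ (b = li ∨ b = lj)) := by
      intro a b hab
      rw [hφ] at hab
      by_cases ha : a = lj <;> by_cases hb : b = lj <;> simp [ha, hb] at hab ⊢
      · tauto
      · tauto
      · tauto
    have hclassu : ∀ x, x < n → (lab.getD x 0 = li ∨ lab.getD x 0 = lj) →
        (if (pvG p)^[n] x = v then u else (pvG p)^[n] x) = u := by
      intro w hw hval
      have hrtw : (pvG p)^[n] w = rti ∨ (pvG p)^[n] w = rtj := by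
        rcases hval with h | h
        · exact Or.inl (hI.hinj w hw i hi (by rw [h]))
        · exact Or.inr (hI.hinj w hw j hj (by rw [h]))
      have : (pvG p)^[n] w = u ∨ (pvG p)^[n] w = v := by
        rcases huv with ⟨h1, h2⟩ | ⟨h1, h2⟩ <;> rcases hrtw with h | h <;> rw [h] <;> tauto
      rcases this with h | h
      · rw [h]; simp
      · rw [h, if_pos rfl]
    rcases hphi _ _ hxy with h | ⟨ha, hb⟩
    · rw [hI.hinj x hx y hy h]
    · rw [hclassu x hx ha, hclassu y hy hb]
  · intro r hr hrt3r
    have hrneqv : r ≠ v := by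
      intro e
      have : pvG p3 r = r := hrt3r
      rw [e, hg3, if_pos rfl] at this
      exact huvne this
    have hrtp : pvRt p r := by
      have : pvG p3 r = r := hrt3r
      rwa [hg3, if_neg hrneqv] at this
    have hrl : r < lab.length := hI.hl ▸ hr
    rw [hlab', pvGetD_map hrl]
    by_cases hru' : r = u
    · subst hru'
      rw [pvGetD_set_self (hI.hs ▸ hun), hφu]
      have hcu := hI.hsize r hr hrtp
      have hcv := hI.hsize v hvn hrv
      rw [hcu, hcv, pvCount_map]
      have hcongr : lab.countP (fun x => φ x == li) = lab.countP (fun x => (x == li) || (x == lj)) := by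
        apply List.countP_congr
        intro x _
        by_cases hx : x = lj
        · subst hx
          rw [hφlj]
          simp
        · have hfx : φ x = x := if_neg hx
          rw [hfx]
          simp [hx]
      rw [hcongr, pvCountP_or_disjoint (by
        intro x _ hx
        have h1 : x = li := by simpa using hx.1
        have h2 : x = lj := by simpa using hx.2
        exact hlij (h1.symm.trans h2))]
      have h1 : lab.countP (fun x => x == li) = lab.count li := rfl
      have h2 : lab.countP (fun x => x == lj) = lab.count lj := rfl
      rw [h1, h2]
      rcases hLuv with ⟨ha, hb⟩ | ⟨ha, hb⟩
      · rw [ha, hb]; push_cast; ring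
      · rw [ha, hb]; push_cast; ring
    · rw [pvGetD_set_ne hru']
      have hnli : lab.getD r 0 ≠ li := by
        intro h
        have := hI.hinj r hr i hi (by rw [h])
        rw [pvRt_iterate hrtp n] at this
        rcases huv with ⟨h1, _⟩ | ⟨_, h2⟩
        · exact hru' (this.trans h1.symm)
        · exact hrneqv (this.trans h2.symm)
      have hnlj : lab.getD r 0 ≠ lj := by
        intro h
        have := hI.hinj r hr j hj (by rw [h])
        rw [pvRt_iterate hrtp n] at this
        rcases huv with ⟨_, h2⟩ | ⟨h1, _⟩
        · exact hrneqv (this.trans h2.symm)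
        · exact hru' (this.trans h1.symm)
      have hφr : φ (lab.getD r 0) = lab.getD r 0 := if_neg hnlj
      rw [hφr, hI.hsize r hr hrtp, pvCount_map]
      congr 1
      have : lab.countP (fun x => φ x == lab.getD r 0) = lab.countP (fun x => x == lab.getD r 0) := by
        apply List.countP_congr
        intro x _
        by_cases hx : x = lj
        · subst hx
          rw [hφlj]
          constructor
          · intro h; exact absurd (eq_of_beq h) (Ne.symm hnli)
          · intro h; exact absurd (eq_of_beq h) (Ne.symm hnlj)
        · have hfx : φ x = x := if_neg hx
          rw [hfx]
      rw [this]; rfl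

theorem pvLab_rt {n : Nat} {p sz lab : List Int} (hI : DSUInv n p sz lab)
    {x y : Nat} (hx : x < n) (hy : y < n) (h : (pvG p)^[n] x = (pvG p)^[n] y) :
    lab.getD x 0 = lab.getD y 0 := by
  rw [← pvLab_iter hI hx n, ← pvLab_iter hI hy n, h]

theorem pvUnion_inv {n : Nat} {p sz lab : List Int} (hI : DSUInv n p sz lab)
    {i j : Nat} (hi : i < n) (hj : j < n) :
    DSUInv n (dsuUnion p sz (i : Int) (j : Int)).1 (dsuUnion p sz (i : Int) (j : Int)).2
      (if lab.getD i 0 ≠ lab.getD j 0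
       then lab.map (fun l => if l = lab.getD j 0 then lab.getD i 0 else l) else lab) := by
  obtain ⟨hI1, hrt1, hroots1, hval1⟩ := pvFind_spec hI hi
  obtain ⟨hI2, hrt2, hroots2, hval2⟩ := pvFind_spec hI1 hj
  have hvalb : (dsuFind (dsuFind p (i:Int)).1 (j:Int)).2 = (((pvG p)^[n] j : Nat) : Int) := by
    rw [hval2, hrt1 j hj]
  by_cases heq : (pvG p)^[n] i = (pvG p)^[n] j
  · have hcond : (dsuFind p (i:Int)).2 = (dsuFind (dsuFind p (i:Int)).1 (j:Int)).2 := by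
      rw [hval1, hvalb, heq]
    have hlabeq : lab.getD i 0 = lab.getD j 0 := pvLab_rt hI hi hj heq
    rw [if_neg (by rw [hlabeq]; exact fun h => h rfl)]
    simp only [dsuUnion, if_pos hcond]
    exact hI2
  · have hcond : ¬ ((dsuFind p (i:Int)).2 = (dsuFind (dsuFind p (i:Int)).1 (j:Int)).2) := by
      rw [hval1, hvalb]
      exact fun h => heq (by exact_mod_cast h)
    have hlabne : lab.getD i 0 ≠ lab.getD j 0 := fun h => heq (hI.hinj i hi j hj h)
    rw [if_pos hlabne]
    simp only [dsuUnion, hval1, hvalb, Nat.cast_inj]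
    rw [if_neg heq]
    -- the two swap cases
    have hne2 : (pvG (dsuFind (dsuFind p (i:Int)).1 (j:Int)).1)^[n] i ≠ (pvG (dsuFind (dsuFind p (i:Int)).1 (j:Int)).1)^[n] j := by
      rw [hrt2 i hi, hrt1 i hi, hrt2 j hj, hrt1 j hj]; exact heq
  -- lab getD's for i j are the same relative to hI2 (lab unchanged)
    by_cases hsz : PySem.List.pyGetD sz (((pvG p)^[n] i : Nat) : Int) 0 < PySem.List.pyGetD sz (((pvG p)^[n] j : Nat) : Int) 0
    · rw [if_pos hsz]
      simp only [PySem.List.pySetD_natCast]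
      have h := pvMerge_inv (u := (pvG p)^[n] j) (v := (pvG p)^[n] i) hI2 hi hj hne2
        (Or.inr ⟨by rw [hrt2 j hj, hrt1 j hj], by rw [hrt2 i hi, hrt1 i hi]⟩)
      simpa using h
    · rw [if_neg hsz]
      simp only [PySem.List.pySetD_natCast]
      have h := pvMerge_inv (u := (pvG p)^[n] i) (v := (pvG p)^[n] j) hI2 hi hj hne2
        (Or.inl ⟨by rw [hrt2 i hi, hrt1 i hi], by rw [hrt2 j hj, hrt1 j hj]⟩)
      simpa using h

theorem pvFold_inv {n : Nat} (es : List (Int × Int × Int))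
    (hes : ∀ e ∈ es, ∃ a b : Nat, e.2.1 = (a : Int) ∧ e.2.2 = (b : Int) ∧ a < n ∧ b < n) :
    ∀ {p sz lab : List Int}, DSUInv n p sz lab →
    DSUInv n (es.foldl (fun (st : List Int × List Int) e => dsuUnion st.1 st.2 e.2.1 e.2.2) (p, sz)).1
             (es.foldl (fun (st : List Int × List Int) e => dsuUnion st.1 st.2 e.2.1 e.2.2) (p, sz)).2
             (es.foldl (fun lab (e : Int × Int × Int) =>
                let li := PySem.List.pyGetD lab e.2.1 0
                let lj := PySem.List.pyGetD lab e.2.2 0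
                if li ≠ lj then lab.map (fun l => if l = lj then li else l) else lab) lab) := by
  induction es with
  | nil => intro p sz lab hI; exact hI
  | cons e es ih =>
    intro p sz lab hI
    obtain ⟨a, b, ha, hb, han, hbn⟩ := hes e (by simp)
    have hu := pvUnion_inv hI han hbn
    have h2 := ih (fun e' he' => hes e' (by simp [he'])) hu
    simp only [List.foldl_cons, ha, hb, PySem.List.pyGetD_natCast]
    simp only [Prod.mk.eta] at h2
    exact h2

theorem pvInit_inv {n : Nat} :
    DSUInv n (PySem.List.pyRange 0 (n : Int) 1) (List.replicate n (1 : Int)) (PySem.List.pyRange 0 (n : Int) 1) := by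
  have hlen : (PySem.List.pyRange 0 (n:Int) 1).length = n := by
    rw [PySem.List.length_pyRange_one]; simp
  have hgetD : ∀ x, x < n → (PySem.List.pyRange 0 (n:Int) 1).getD x 0 = (x : Int) := by
    intro x hx
    rw [PySem.List.pyRange_zero_nat, PySem.List.getD_map_range _ _ _ _ hx]
  have hgx : ∀ x, x < n → pvG (PySem.List.pyRange 0 (n:Int) 1) x = x := by
    intro x hx
    show ((PySem.List.pyRange 0 (n:Int) 1).getD x 0).toNat = x
    rw [hgetD x hx, Int.toNat_natCast]
  refine ⟨hlen, by simp, hlen, ?_, ?_, ?_, ?_, ?_, ?_⟩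
  · intro x hx; rw [hgetD x hx]; exact Int.natCast_nonneg x
  · intro x hx; rw [hgx x hx]; exact hx
  · intro x hx; exact ⟨0, hgx x hx⟩
  · intro x hx; rw [hgx x hx]
  · intro x hx y hy hxy
    rw [hgetD x hx, hgetD y hy] at hxy
    have hxey : x = y := by exact_mod_cast hxy
    rw [hxey]
  · intro r hr _
    rw [List.getD_replicate _ hr, hgetD r hr]
    have hc : (PySem.List.pyRange 0 (n:Int) 1).count ((r : Nat) : Int) = 1 :=
      List.count_eq_one_of_mem (PySem.List.nodup_pyRange_one 0 (n:Int))
        (PySem.List.mem_pyRange_one.mpr ⟨Int.natCast_nonneg r, by exact_mod_cast hr⟩)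
    rw [hc]
    rfl

def pvFirstsBy {α κ : Type} [DecidableEq κ] (key : α → κ) : List α → List α
  | [] => []
  | x :: xs => x :: pvFirstsBy key (xs.filter (fun y => key y ≠ key x))
termination_by l => l.length
decreasing_by simp; exact le_trans (List.length_filter_le _ _) (by simp)

theorem pvFirstsBy_subset {α κ : Type} [DecidableEq κ] (key : α → κ) :
    ∀ (l : List α), ∀ z ∈ pvFirstsBy key l, z ∈ l := by
  intro l
  induction hn : l.length using Nat.strong_induction_on generalizing l with
  | _ n ih =>
    cases l with
    | nil => intro z hz; simpa [pvFirstsBy] using hz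
    | cons a l' =>
      intro z hz
      rw [pvFirstsBy] at hz
      rcases List.mem_cons.mp hz with h | h
      · simp [h]
      · have hlen : (l'.filter (fun y => key y ≠ key a)).length < n := by
          subst hn
          simp only [List.length_cons]
          exact Nat.lt_succ_of_le (List.length_filter_le _ _)
        have := ih _ hlen _ rfl z h
        rcases List.mem_filter.mp this with ⟨hmem, _⟩
        simp [hmem]

theorem pvFirstsBy_filter_key {α κ : Type} [DecidableEq κ] (key : α → κ) (q : κ → Bool) :
    ∀ (l : List α),
    (pvFirstsBy key l).filter (fun y => q (key y)) = pvFirstsBy key (l.filter (fun y => q (key y))) := by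
  intro l
  induction hn : l.length using Nat.strong_induction_on generalizing l with
  | _ n ih =>
    cases l with
    | nil => simp [pvFirstsBy]
    | cons a l' =>
      have hlen : (l'.filter (fun y => key y ≠ key a)).length < n := by
        subst hn
        simp only [List.length_cons]
        exact Nat.lt_succ_of_le (List.length_filter_le _ _)
      by_cases hqa : q (key a) = true
      · rw [pvFirstsBy, List.filter_cons_of_pos (p := fun y => q (key y)) hqa,
          List.filter_cons_of_pos (p := fun y => q (key y)) hqa, pvFirstsBy]
        congr 1
        rw [ih _ hlen _ rfl, List.filter_filter, List.filter_filter,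
          List.filter_congr (fun y _ => Bool.and_comm _ _)]
      · have hqa' : (fun y => q (key y)) a = false := by simpa using hqa
        rw [pvFirstsBy, List.filter_cons_of_neg (p := fun y => q (key y)) (by simpa using hqa),
          List.filter_cons_of_neg (p := fun y => q (key y)) (by simpa using hqa)]
        rw [ih _ hlen _ rfl]
        congr 1
        rw [List.filter_filter]
        apply List.filter_congr
        intro y _
        by_cases hqy : q (key y) = true
        · have hya : key y ≠ key a := by
            intro h
            rw [h] at hqy
            exact absurd hqy (by simpa using hqa)
          simp [hqy, hya]
        · simp [Bool.eq_false_iff.mpr hqy]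

theorem pvFirstsBy_congr {α κ1 κ2 : Type} [DecidableEq κ1] [DecidableEq κ2]
    (key1 : α → κ1) (key2 : α → κ2) :
    ∀ (l : List α), (∀ a ∈ l, ∀ b ∈ l, (key1 a = key1 b ↔ key2 a = key2 b)) →
    pvFirstsBy key1 l = pvFirstsBy key2 l := by
  intro l
  induction hn : l.length using Nat.strong_induction_on generalizing l with
  | _ n ih =>
    cases l with
    | nil => simp [pvFirstsBy]
    | cons a l' =>
      intro hiff
      rw [pvFirstsBy, pvFirstsBy]
      have hfeq : l'.filter (fun y => key1 y ≠ key1 a) = l'.filter (fun y => key2 y ≠ key2 a) := by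
        apply List.filter_congr
        intro y hy
        have hya := hiff y (by simp [hy]) a (by simp)
        by_cases h : key1 y = key1 a
        · have h2 := hya.mp h
          simp [h, h2]
        · have h2 : ¬ key2 y = key2 a := fun hh => h (hya.mpr hh)
          simp [h, h2]
      have hlen : (l'.filter (fun y => key1 y ≠ key1 a)).length < n := by
        subst hn
        simp only [List.length_cons]
        exact Nat.lt_succ_of_le (List.length_filter_le _ _)
      congr 1
      rw [hfeq]
      apply ih _ (hfeq ▸ hlen) _ rfl
      intro x hx y hy
      exact hiff x (by simp [(List.mem_filter.mp hx).1]) y (by simp [(List.mem_filter.mp hy).1])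

theorem pvFirstsBy_append {α κ : Type} [DecidableEq κ] (key : α → κ) (x : α) :
    ∀ (l : List α),
    pvFirstsBy key (l ++ [x]) = if (∃ y ∈ l, key y = key x) then pvFirstsBy key l
      else pvFirstsBy key l ++ [x] := by
  intro l
  induction hn : l.length using Nat.strong_induction_on generalizing l with
  | _ n ih =>
    cases l with
    | nil => simp [pvFirstsBy]
    | cons a l' =>
      have hlen : (l'.filter (fun y => key y ≠ key a)).length < n := by
        subst hn
        simp only [List.length_cons]
        exact Nat.lt_succ_of_le (List.length_filter_le _ _)
      rw [List.cons_append, pvFirstsBy, pvFirstsBy]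
      by_cases hxa : key x = key a
      · have hsing : ([x].filter (fun y => key y ≠ key a)) = [] := by simp [hxa]
        rw [List.filter_append, hsing, List.append_nil, if_pos ⟨a, by simp, hxa.symm⟩]
      · have hsing : ([x].filter (fun y => key y ≠ key a)) = [x] := by simp [hxa]
        rw [List.filter_append, hsing, ih _ hlen _ rfl]
        by_cases hex : ∃ y ∈ l'.filter (fun y => key y ≠ key a), key y = key x
        · rw [if_pos hex]
          obtain ⟨y, hy, hyx⟩ := hex
          rw [if_pos ⟨y, by simp [(List.mem_filter.mp hy).1], hyx⟩]
        · rw [if_neg hex]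
          rw [if_neg (by
            rintro ⟨y, hy, hyx⟩
            rcases List.mem_cons.mp hy with h | h
            · exact hxa (h ▸ hyx).symm
            · exact hex ⟨y, List.mem_filter.mpr ⟨h, by
                simp only [ne_eq, decide_eq_true_eq]
                intro hk
                exact hxa (hyx.symm.trans hk) ⟩, hyx⟩)]
          simp

theorem pvDictFold_items (key : Nat → Int) (val : Nat → Int) (l : List Nat)
    (hval : ∀ a ∈ l, ∀ b ∈ l, key a = key b → val a = val b) :
    (l.foldl (fun (d : PySem.Dict Int Int) z => d.insert (key z) (val z)) PySem.Dict.empty).items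
    = (pvFirstsBy key l).map (fun z => (key z, val z)) := by
  induction l using List.reverseRecOn with
  | nil => simp [pvFirstsBy, PySem.Dict.empty]
  | append_singleton l x ih =>
    have hval' : ∀ a ∈ l, ∀ b ∈ l, key a = key b → val a = val b := by
      intro a ha b hb
      exact hval a (by simp [ha]) b (by simp [hb])
    have ihl := ih hval'
    rw [List.foldl_append, List.foldl_cons, List.foldl_nil, pvFirstsBy_append]
    set D := l.foldl (fun (d : PySem.Dict Int Int) z => d.insert (key z) (val z)) PySem.Dict.empty with hD
    have hkeys : D.keys = PySem.Set.ofList (l.map key) := by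
      rw [hD, PySem.Dict.keys_foldl_insert_key l key (fun d z => val z) PySem.Dict.empty]
      simp [PySem.Set.update_nil_left]
    by_cases hex : ∃ y ∈ l, key y = key x
    · rw [if_pos hex]
      have hcont : D.contains (key x) = true := by
        rw [PySem.Dict.contains_iff_mem_keys, hkeys, PySem.Set.mem_ofList]
        obtain ⟨y, hy, hyx⟩ := hex
        exact List.mem_map.mpr ⟨y, hy, hyx⟩
      rw [PySem.Dict.items_insert_of_contains D (val x) hcont, ihl, List.map_map]
      apply List.map_congr_left
      intro z hz
      have hzl : z ∈ l := pvFirstsBy_subset key l z hz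
      simp only [Function.comp]
      by_cases hk : key z = key x
      · have hv : val z = val x := hval z (by simp [hzl]) x (by simp) hk
        simp [hk, hv]
      · simp [hk]
    · rw [if_neg hex]
      have hcont : D.contains (key x) = false := by
        rw [← Bool.not_eq_true, PySem.Dict.contains_iff_mem_keys, hkeys, PySem.Set.mem_ofList]
        intro hmem
        obtain ⟨y, hy, hyx⟩ := List.mem_map.mp hmem
        exact hex ⟨y, hy, hyx⟩
      rw [PySem.Dict.items_insert_of_not_contains D (val x) hcont, ihl, List.map_append]
      simp

theorem pvOfList_map (L : Nat → Int) : ∀ (idxs : List Nat),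
    PySem.Set.ofList (idxs.map L) = (pvFirstsBy L idxs).map L := by
  intro idxs
  induction hn : idxs.length using Nat.strong_induction_on generalizing idxs with
  | _ n ih =>
    cases idxs with
    | nil => simp [pvFirstsBy, PySem.Set.ofList]
    | cons z rest =>
      have hlen : (rest.filter (fun y => L y ≠ L z)).length < n := by
        subst hn
        simp only [List.length_cons]
        exact Nat.lt_succ_of_le (List.length_filter_le _ _)
      rw [List.map_cons, PySem.Set.ofList_cons, pvFirstsBy, List.map_cons]
      congr 1
      rw [ih _ (by subst hn; simp) _ rfl]
      show (List.map L (pvFirstsBy L rest)).filter (fun y => !(y == L z)) = _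
      rw [List.filter_map]
      have hpred : (pvFirstsBy L rest).filter ((fun y => !(y == L z)) ∘ L)
          = (pvFirstsBy L rest).filter (fun y => (fun c => !(c == L z)) (L y)) := rfl
      rw [hpred, pvFirstsBy_filter_key L (fun c => !(c == L z)) rest]
      congr 2
      apply List.filter_congr
      intro y _
      by_cases h : L y = L z <;> simp [h]

def pvStepA (szf : List Int) (pc : List Int × PySem.Dict Int Int) (i : Int) :
    List Int × PySem.Dict Int Int :=
  let fr := dsuFind pc.1 i
  (fr.1, pc.2.insert fr.2 (PySem.List.pyGetD szf fr.2 0))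

theorem pvCompFold {n : Nat} {sz lab : List Int} (szf : List Int) :
    ∀ (zs : List Nat) (p0 : List Int) (d0 : PySem.Dict Int Int) (p : List Int),
    DSUInv n p0 sz lab → (∀ w, w < n → (pvG p0)^[n] w = (pvG p)^[n] w) → (∀ z ∈ zs, z < n) →
    ((zs.map (fun (z : Nat) => (z : Int))).foldl (pvStepA szf) (p0, d0)).2
    = zs.foldl (fun d z => d.insert (((pvG p)^[n] z : Nat) : Int)
        (PySem.List.pyGetD szf (((pvG p)^[n] z : Nat) : Int) 0)) d0 := by
  intro zs
  induction zs with
  | nil => intro p0 d0 p _ _ _; rfl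
  | cons z zs ih =>
    intro p0 d0 p hI0 hpres hzs
    have hz : z < n := hzs z (by simp)
    obtain ⟨hI1, hrt1, hroots1, hval1⟩ := pvFind_spec hI0 hz
    rw [List.map_cons, List.foldl_cons]
    have hstep : pvStepA szf (p0, d0) (z : Int)
        = ((dsuFind p0 (z:Int)).1, d0.insert (dsuFind p0 (z:Int)).2
            (PySem.List.pyGetD szf (dsuFind p0 (z:Int)).2 0)) := rfl
    rw [hstep, List.foldl_cons,
      ih (dsuFind p0 (z:Int)).1 _ p hI1
        (fun w hw => (hrt1 w hw).trans (hpres w hw)) (fun y hy => hzs y (by simp [hy])),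
      hval1, hpres z hz]

theorem pvParse_eq (lines : List String) :
    parsePoints lines = (lines.filter (fun line => !(PySem.Str.strip line == ""))).map
      (fun line => pvParseTriple (PySem.Str.strip line)) := by
  show lines.foldl _ [] = _
  have hfun : (fun (pts : List (Int × Int × Int)) line =>
      if PySem.Str.strip line = "" then pts
      else pts ++ [pvParseTriple (PySem.Str.strip line)])
      = (fun pts line => if ¬ (PySem.Str.strip line = "")
          then pts ++ [pvParseTriple (PySem.Str.strip line)] else pts) := by
    funext pts line
    by_cases h : PySem.Str.strip line = "" <;> simp [h]
  rw [hfun, PySem.List.foldl_append_ite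
    (p := fun line => ¬ (PySem.Str.strip line = ""))
    (f := fun line => pvParseTriple (PySem.Str.strip line))]
  rw [List.nil_append]
  congr 1
  apply List.filter_congr
  intro line _
  by_cases h : PySem.Str.strip line = "" <;> simp [h]

theorem pvEdges_eq (pts : List (Int × Int × Int)) :
    (PySem.List.pyRange 0 (pts.length : Int) 1).foldl (fun edges i =>
      let pi := PySem.List.pyGetD pts i (0, 0, 0)
      (PySem.List.pyRange (i+1) (pts.length : Int) 1).foldl (fun edges j =>
        let pj := PySem.List.pyGetD pts j (0, 0, 0)
        let dx := pi.1 - pj.1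
        let dy := pi.2.1 - pj.2.1
        let dz := pi.2.2 - pj.2.2
        edges ++ [(dx*dx + dy*dy + dz*dz, i, j)]) edges) []
    = (PySem.List.pyRange 0 (pts.length : Int) 1).flatMap (fun i =>
      (PySem.List.pyRange (i+1) (pts.length : Int) 1).map (fun j =>
        let pi := PySem.List.pyGetD pts i (0, 0, 0)
        let pj := PySem.List.pyGetD pts j (0, 0, 0)
        ((pi.1 - pj.1) * (pi.1 - pj.1) + (pi.2.1 - pj.2.1) * (pi.2.1 - pj.2.1)
          + (pi.2.2 - pj.2.2) * (pi.2.2 - pj.2.2), i, j))) := by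
  have hfun : (fun (edges : List (Int × Int × Int)) (i : Int) =>
      let pi := PySem.List.pyGetD pts i (0, 0, 0)
      (PySem.List.pyRange (i+1) (pts.length : Int) 1).foldl (fun edges j =>
        let pj := PySem.List.pyGetD pts j (0, 0, 0)
        let dx := pi.1 - pj.1
        let dy := pi.2.1 - pj.2.1
        let dz := pi.2.2 - pj.2.2
        edges ++ [(dx*dx + dy*dy + dz*dz, i, j)]) edges)
      = (fun edges i => edges ++ (PySem.List.pyRange (i+1) (pts.length : Int) 1).map (fun j =>
        let pi := PySem.List.pyGetD pts i (0, 0, 0)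
        let pj := PySem.List.pyGetD pts j (0, 0, 0)
        ((pi.1 - pj.1) * (pi.1 - pj.1) + (pi.2.1 - pj.2.1) * (pi.2.1 - pj.2.1)
          + (pi.2.2 - pj.2.2) * (pi.2.2 - pj.2.2), i, j))) := by
    funext edges i
    show (PySem.List.pyRange (i+1) (pts.length : Int) 1).foldl (fun edges j =>
        edges ++ [(fun j =>
          let pi := PySem.List.pyGetD pts i (0, 0, 0)
          let pj := PySem.List.pyGetD pts j (0, 0, 0)
          ((pi.1 - pj.1) * (pi.1 - pj.1) + (pi.2.1 - pj.2.1) * (pi.2.1 - pj.2.1)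
            + (pi.2.2 - pj.2.2) * (pi.2.2 - pj.2.2), i, j)) j]) edges = _
    rw [PySem.List.foldl_append_singleton_eq_map]
  rw [hfun, PySem.List.foldl_append_eq_flatMap]
  rw [List.nil_append]

theorem pvSlice_nil {α : Type} (k : Int) : PySem.List.slice ([] : List α) none (some k) = [] := by
  by_cases h : 0 ≤ k
  · rw [PySem.List.slice_to _ h]
    simp
  · have hm : k = -(((-k).toNat : Nat) : Int) := by omega
    rw [hm, PySem.List.slice_to_neg_natCast _ _ (by omega)]
    simp

theorem pvSelf_map (l : List Int) : l = (List.range l.length).map (fun z => l.getD z 0) := by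
  apply List.ext_getElem
  · simp
  · intro i h1 h2
    simp [List.getD_eq_getElem?_getD, List.getElem?_eq_getElem (by simpa using h2)]

theorem pvMain (lines : List String) (k : Int) : solve lines k = solve_alt lines k := by
  simp only [solve, solve_alt]
  rw [← pvParse_eq lines]
  set pts := parsePoints lines with hpts
  by_cases hn0 : pts.length = 0
  · rw [if_pos hn0]
    have hnil : pts = [] := List.eq_nil_of_length_eq_zero hn0
    rw [hnil]
    have h1 : PySem.List.pyRange 0 ((([] : List (Int × Int × Int)).length : Int)) 1 = [] := by
      simp [PySem.List.pyRange_one_eq_nil]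
    rw [h1]
    simp only [List.flatMap_nil]
    rw [(PySem.List.sorted_eq_nil_iff _ _ _).mpr rfl, pvSlice_nil, List.foldl_nil, List.foldl_nil]
    rw [show (PySem.Dict.empty : PySem.Dict Int Int).values = [] from rfl]
    rw [(PySem.List.sorted_eq_nil_iff _ _ _).mpr rfl, pvSlice_nil]
    rw [if_pos (by simp)]
  · rw [if_neg hn0]
    simp only [kShortestEdges]
    rw [pvEdges_eq pts]
    set n := pts.length with hn
    set E := PySem.List.slice (PySem.List.sorted
      ((PySem.List.pyRange 0 (n : Int) 1).flatMap (fun i =>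
        (PySem.List.pyRange (i+1) (n : Int) 1).map (fun j =>
          let pi := PySem.List.pyGetD pts i (0, 0, 0)
          let pj := PySem.List.pyGetD pts j (0, 0, 0)
          ((pi.1 - pj.1) * (pi.1 - pj.1) + (pi.2.1 - pj.2.1) * (pi.2.1 - pj.2.1)
            + (pi.2.2 - pj.2.2) * (pi.2.2 - pj.2.2), i, j))))
      (fun t => t.1) false) none (some k) with hE
    have hes : ∀ e ∈ E, ∃ a b : Nat, e.2.1 = (a : Int) ∧ e.2.2 = (b : Int) ∧ a < n ∧ b < n := by
      intro e he
      rw [hE] at he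
      have h1 := PySem.List.mem_of_mem_slice _ _ _ he
      rw [PySem.List.mem_sorted, List.mem_flatMap] at h1
      obtain ⟨i, hi, hj⟩ := h1
      rw [List.mem_map] at hj
      obtain ⟨j, hjm, hje⟩ := hj
      rw [PySem.List.mem_pyRange_one] at hi hjm
      refine ⟨i.toNat, j.toNat, ?_, ?_, ?_, ?_⟩
      · rw [← hje]; simp [Int.toNat_of_nonneg hi.1]
      · rw [← hje]; simp [Int.toNat_of_nonneg (by omega : (0:Int) ≤ j)]
      · omega
      · omega
    set st := E.foldl (fun (st : List Int × List Int) e => dsuUnion st.1 st.2 e.2.1 e.2.2)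
      (PySem.List.pyRange 0 (n : Int) 1, List.replicate n (1 : Int)) with hst
    set labels := E.foldl (fun lab (e : Int × Int × Int) =>
        let li := PySem.List.pyGetD lab e.2.1 0
        let lj := PySem.List.pyGetD lab e.2.2 0
        if li ≠ lj then lab.map (fun l => if l = lj then li else l) else lab)
      (PySem.List.pyRange 0 (n : Int) 1) with hlabels
    have hInv : DSUInv n st.1 st.2 labels := by
      rw [hst, hlabels]
      exact pvFold_inv E hes pvInit_inv
    have hstepA : (fun (pc : List Int × PySem.Dict Int Int) i =>
        let fr := dsuFind pc.1 i
        (fr.1, pc.2.insert fr.2 (PySem.List.pyGetD st.2 fr.2 0))) = pvStepA st.2 := rfl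
    rw [hstepA, PySem.List.pyRange_zero_nat]
    rw [pvCompFold st.2 (List.range n) st.1 PySem.Dict.empty st.1 hInv
      (fun w _ => rfl) (fun z hz => List.mem_range.mp hz)]
    have hval : ∀ a ∈ List.range n, ∀ b ∈ List.range n,
        (((pvG st.1)^[n] a : Nat) : Int) = (((pvG st.1)^[n] b : Nat) : Int) →
        PySem.List.pyGetD st.2 (((pvG st.1)^[n] a : Nat) : Int) 0
          = PySem.List.pyGetD st.2 (((pvG st.1)^[n] b : Nat) : Int) 0 := by
      intro a _ b _ h
      rw [h]
    simp only [PySem.Dict.values]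
    rw [pvDictFold_items _ _ _ hval, List.map_map]
    rw [PySem.Dict.foldl_insert_getD_add_one_eq_counter, PySem.Dict.items_counter, List.map_map]
    have hlabself : labels = (List.range n).map (fun z => labels.getD z 0) := by
      conv_lhs => rw [pvSelf_map labels]
      rw [hInv.hl]
    have hofl : PySem.Set.ofList labels
        = (pvFirstsBy (fun z => labels.getD z 0) (List.range n)).map (fun z => labels.getD z 0) := by
      conv_lhs => rw [hlabself]
      exact pvOfList_map _ _
    rw [hofl, List.map_map]
    have hiff : ∀ a ∈ List.range n, ∀ b ∈ List.range n,
        ((((pvG st.1)^[n] a : Nat) : Int) = (((pvG st.1)^[n] b : Nat) : Int)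
          ↔ labels.getD a 0 = labels.getD b 0) := by
      intro a ha b hb
      rw [Nat.cast_inj]
      constructor
      · intro h
        exact pvLab_rt hInv (List.mem_range.mp ha) (List.mem_range.mp hb) h
      · intro h
        exact hInv.hinj a (List.mem_range.mp ha) b (List.mem_range.mp hb) h
    rw [pvFirstsBy_congr _ _ (List.range n) hiff]
    have hvals : ∀ z ∈ pvFirstsBy (fun z => labels.getD z 0) (List.range n),
        ((fun x => x.2) ∘ fun z => ((((pvG st.1)^[n] z : Nat) : Int),
          PySem.List.pyGetD st.2 (((pvG st.1)^[n] z : Nat) : Int) 0)) z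
        = ((fun x => x.2) ∘ fun k_1 => (k_1, ((labels.count k_1 : Nat) : Int)))
            ((fun z => labels.getD z 0) z) := by
      intro z hz
      have hzn : z < n := List.mem_range.mp (pvFirstsBy_subset _ _ _ hz)
      have hrtn : (pvG st.1)^[n] z < n := pvIter_lt hInv.hrange hzn n
      simp only [Function.comp]
      rw [PySem.List.pyGetD_natCast]
      rw [hInv.hsize _ hrtn (pvRt_rt hInv hzn), pvLab_iter hInv hzn n]
    rw [List.map_congr_left hvals]
    rfl

-- ===== VERDICT (by name: the statement is the Claim_ definition above) =====
theorem solve_spec : Claim_equal_solve := by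
  intro lines k _ _
  exact pvMain lines k
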